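-- pv_equiv track=rewrite | github.com/blegloannec/CodeProblems | Kattis/greatswercporto.py | solve_count
-- ===== SOURCE A (Python) =====
-- import itertools
--
-- def solve_count(W):
--     L = set()
--     for w in W:
--         L |= set(w)
--     L = list(L)
--     W = [[L.index(c) for c in w] for w in W]
--     T = W.pop()
--     cnt = 0
--     for X in itertools.combinations(range(10),len(L)):
--         for Y in itertools.permutations(X):
--             if Y[T[0]]!=0:
--                 S = 0
--                 for w in W:
--                     s = 0
--                     for c in w:
--                         s = 10*s+Y[c]
--                     S += s
--                 ST = 0
--                 for c in T:
--                     ST = 10*ST+Y[c]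
--                 if S==ST and all(Y[w[0]]!=0 for w in W):
--                     cnt += 1
--     return cnt
-- ===== SOURCE B (Python) =====
-- def solve_count(W):
--     # Linear-equation formulation: each letter gets a signed positional coefficient
--     # (addend words +10^pos, target word -10^pos); an assignment is valid iff the
--     # weighted sum is 0 and no leading letter is 0.  Count by recursive backtracking
--     # over the letters with the list of still-available digits, pruning the
--     # digit-0 branch of leading letters.
--     letters = []
--     for w in W:
--         for ch in w:
--             if ch not in letters:
--                 letters.append(ch)
--     k = len(letters)
--     target = W[-1]
--     body = W[:-1]
--     coeff = [0] * k
--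
--     def addw(w, s):
--         p = 1
--         for ch in reversed(w):
--             coeff[letters.index(ch)] += s * p
--             p *= 10
--
--     for w in body:
--         addw(w, 1)
--     addw(target, -1)
--     lead = [False] * k
--     for w in W:
--         if w:
--             lead[letters.index(w[0])] = True
--
--     def rec(items, avail, total):
--         if not items:
--             return 1 if total == 0 else 0
--         (c, ld) = items[0]
--         rest = items[1:]
--         cnt = 0
--         for d in avail:
--             if ld and d == 0:
--                 continue
--             cnt += rec(rest, [e for e in avail if e != d], total + c * d)
--         return cnt
--
--     return rec(list(zip(coeff, lead)), list(range(10)), 0)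
-- ===== Notes on version B (the rewrite author's own statement) =====
-- stated objective: faster
-- what changed: A re-scans every word to evaluate the sum for each of the P(10,k) candidate tuples produced by combinations x permutations; B reduces the puzzle once to one signed coefficient per letter (a linear equation) and counts by recursive backtracking over letters with the list of unused digits, checking a single dot product at the leaves and pruning digit-0 branches of leading letters.
-- outside the precondition, e.g. on solve_count(['', 'A', 'B']): A returns 0, B returns 0
import Mathlib
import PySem

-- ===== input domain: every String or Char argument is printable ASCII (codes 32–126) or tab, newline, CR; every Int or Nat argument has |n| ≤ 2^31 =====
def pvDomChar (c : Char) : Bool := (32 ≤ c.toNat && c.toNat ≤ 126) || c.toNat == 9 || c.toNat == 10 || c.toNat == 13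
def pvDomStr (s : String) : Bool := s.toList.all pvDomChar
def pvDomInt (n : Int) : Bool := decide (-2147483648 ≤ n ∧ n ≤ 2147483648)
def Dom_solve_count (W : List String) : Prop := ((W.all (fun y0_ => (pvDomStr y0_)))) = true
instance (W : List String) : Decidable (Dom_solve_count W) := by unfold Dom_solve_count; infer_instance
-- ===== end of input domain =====

-- B replaces A's combinations×permutations brute force (re-evaluating every word per digit tuple)
-- by a linear-equation formulation: one signed positional coefficient per letter, counted by
-- recursive backtracking over letters with the list of unused digits, pruning leading-zero branches.


-- ===== PORT A =====
-- L = set(); for w in W: L |= set(w)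
def pvLettersA (W : List String) : PySem.Set Char :=
  W.foldl (fun L w => PySem.Set.union L (PySem.Set.ofList w.toList)) PySem.Set.empty

-- the inner digit loop  s = 0; for c in w: s = 10*s + Y[c]  (indices are always in range)
def pvHorner (Y : List Int) (w : List Nat) : Int :=
  w.foldl (fun s c => 10 * s + Y.getD c 0) 0

def solve_count (W : List String) : Int :=
  let L := pvLettersA W
  let Wi : List (List Nat) := W.map (fun w => w.toList.map (fun c => (PySem.List.index? L c).getD 0))
  match PySem.List.pop? Wi with
  | none => 0  -- Python raises IndexError here (W = []); excluded by Pre_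
  | some (T, Ws) =>
    (PySem.List.combinations (PySem.List.pyRange 0 10 1) L.length).foldl (fun cnt X =>
      (PySem.List.permutations X X.length).foldl (fun cnt Y =>
        if Y.getD (T.getD 0 0) 0 ≠ 0 then
          if Ws.foldl (fun S w => S + pvHorner Y w) 0 = pvHorner Y T
              ∧ Ws.all (fun w => decide (Y.getD (w.getD 0 0) 0 ≠ 0)) then cnt + 1
          else cnt
        else cnt) cnt) 0

-- ===== PORT B =====
-- for w in W: for ch in w: if ch not in letters: letters.append(ch)
def pvLettersB (W : List String) : PySem.Set Char :=
  W.foldl (fun ls w => w.toList.foldl PySem.Set.add ls) PySem.Set.empty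

-- addw(w, s): p = 1; for ch in reversed(w): coeff[letters.index(ch)] += s*p; p *= 10
def pvAddw (letters : List Char) (s : Int) (coeff : List Int) (w : List Char) : List Int :=
  (w.reverse.foldl (fun (cp : List Int × Int) ch =>
      (cp.1.set ((PySem.List.index? letters ch).getD 0)
        (cp.1.getD ((PySem.List.index? letters ch).getD 0) 0 + s * cp.2), cp.2 * 10)) (coeff, 1)).1

-- lead = [False]*k; for w in W: if w: lead[letters.index(w[0])] = True
def pvLead (letters : List Char) (W : List String) : List Bool :=
  W.foldl (fun ld w =>
    match w.toList with
    | [] => ld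
    | c :: _ => ld.set ((PySem.List.index? letters c).getD 0) true)
    (List.replicate letters.length false)

-- rec(items, avail, total)
def pvRec : List (Int × Bool) → List Int → Int → Int
  | [], _, total => if total = 0 then 1 else 0
  | (c, ld) :: rest, avail, total =>
    avail.foldl (fun cnt d =>
      if ld = true ∧ d = 0 then cnt
      else cnt + pvRec rest (avail.filter (fun e => e ≠ d)) (total + c * d)) 0

def solve_count_alt (W : List String) : Int :=
  let letters := pvLettersB W
  let k := letters.length
  match PySem.List.pyGet? W (-1) with
  | none => 0  -- Python raises IndexError here (W = []); excluded by Pre_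
  | some target =>
    let body := PySem.List.slice W none (some (-1))
    let coeff := pvAddw letters (-1)
      (body.foldl (fun c w => pvAddw letters 1 c w.toList) (List.replicate k 0)) target.toList
    pvRec (coeff.zip (pvLead letters W)) (PySem.List.pyRange 0 10 1) 0

-- ===== PRECONDITION & SPEC =====
-- Pre_ admits nonempty W with no empty word (the normal case), and nonempty W whose last word is
-- strictly longer than all the other words together (the sum can then never balance and both
-- programs count 0 even with empty words present).  Excluded: W = [], on which A raises
-- IndexError at W.pop(); the remaining empty-word inputs on which A raises IndexError at
-- w[0]/T[0] whenever that indexing is reached; and the empty-word inputs on which A returns 0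
-- only because its sum check never succeeds for a subtler reason than total length — there A
-- and B both return 0, but the unreachability is not a closed-form condition on the input.
def Pre_solve_count (W : List String) : Prop :=
  W ≠ [] ∧ ((∀ w ∈ W, w.toList ≠ []) ∨
    ((W.getLastD "").toList ≠ [] ∧
      (W.dropLast.map (fun w => w.toList.length)).sum + 1 ≤ (W.getLastD "").toList.length))
instance (W : List String) : Decidable (Pre_solve_count W) := by unfold Pre_solve_count; infer_instance
def pvWitness_solve_count : List String := ["A", "A"]
def Spec_solve_count (W : List String) (out : Int) : Prop := out = solve_count_alt W
instance (W : List String) (out : Int) : Decidable (Spec_solve_count W out) := by unfold Spec_solve_count; infer_instance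

-- ===== CLAIM (what is proved, stated in full; the proofs are below) =====
def Claim_equal_solve_count : Prop := ∀ (W : List String), Dom_solve_count W → Pre_solve_count W → Spec_solve_count W (solve_count W)

-- ===== LEMMAS AND PROOFS =====

-- the 10 digits
def pvDigits : List Int := PySem.List.pyRange 0 10 1

def pvIdx (L : List Char) (c : Char) : Nat := (PySem.List.index? L c).getD 0

-- Boolean mirror of pvRec's leaf predicate over a full assignment list
def pvEvalB : List (Int × Bool) → List Int → Int → Bool
  | [], _, t => decide (t = 0)
  | _ :: _, [], _ => false
  | (c, ld) :: ps, d :: Y, t => (decide (¬(ld = true ∧ d = 0))) && pvEvalB ps Y (t + c * d)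

def pvDot (coeff Y : List Int) : Int := ((coeff.zip Y).map (fun p => p.1 * p.2)).sum

def pvAllA (k : Nat) : List (List Int) :=
  (PySem.List.combinations pvDigits k).flatMap (fun X => PySem.List.permutations X X.length)

def pvPredA (T : List Nat) (Ws : List (List Nat)) (Y : List Int) : Bool :=
  decide (Y.getD (T.getD 0 0) 0 ≠ 0 ∧
    (Ws.foldl (fun S w => S + pvHorner Y w) 0 = pvHorner Y T
      ∧ Ws.all (fun w => decide (Y.getD (w.getD 0 0) 0 ≠ 0))))

-- reversed-Horner value of an index word
def pvRVal (Y : List Int) : List Nat → Int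
  | [] => 0
  | c :: r => Y.getD c 0 + 10 * pvRVal Y r

-- ---------- generic list facts ----------

theorem pv_cast_sum (α : Type) (l : List α) (f : α → Nat) :
    (l.map (fun x => ((f x : Nat) : Int))).sum = (((l.map f).sum : Nat) : Int) := by
  rw [Nat.cast_list_sum, List.map_map]
  rfl

theorem pv_map_range_getD (α β : Type) (l : List α) (g : α → β) (d0 : α) :
    (List.range l.length).map (fun i => g (l.getD i d0)) = l.map g := by
  induction l with
  | nil => simp
  | cons x t ih =>
    simp only [List.length_cons, List.range_succ_eq_map, List.map_cons, List.map_map]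
    refine congrArg (g x :: ·) ?_
    simpa [Function.comp] using ih

theorem pv_mem_eraseIdx : ∀ (xs : List Int) (i : Nat), xs.Nodup → (hi : i < xs.length) →
    ∀ a : Int, (a ∈ xs.eraseIdx i ↔ a ∈ xs ∧ a ≠ xs[i])
  | x :: t, 0, hx, hi, a => by
    rcases List.nodup_cons.mp hx with ⟨hxt, _⟩
    simp only [List.eraseIdx_cons_zero, List.getElem_cons_zero, List.mem_cons]
    constructor
    · intro ha
      exact ⟨Or.inr ha, fun he => hxt (he ▸ ha)⟩
    · rintro ⟨ha | ha, hne⟩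
      · exact absurd ha hne
      · exact ha
  | x :: t, i + 1, hx, hi, a => by
    rcases List.nodup_cons.mp hx with ⟨hxt, hnt⟩
    have hi' : i < t.length := by simpa using hi
    simp only [List.eraseIdx_cons_succ, List.getElem_cons_succ, List.mem_cons]
    rw [pv_mem_eraseIdx t i hnt hi' a]
    constructor
    · rintro (rfl | ⟨ha, hne⟩)
      · exact ⟨Or.inl rfl, fun he => hxt (he ▸ t.getElem_mem hi')⟩
      · exact ⟨Or.inr ha, hne⟩
    · rintro ⟨rfl | ha, hne⟩
      · exact Or.inl rfl
      · exact Or.inr ⟨ha, hne⟩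

theorem pv_eraseIdx_eq_erase : ∀ (xs : List Int) (i : Nat), xs.Nodup → (hi : i < xs.length) →
    xs.eraseIdx i = xs.erase xs[i]
  | x :: t, 0, _, _ => by simp
  | x :: t, i + 1, hx, hi => by
    rcases List.nodup_cons.mp hx with ⟨hxt, hnt⟩
    have hi' : i < t.length := by simpa using hi
    have hne : ¬ (x == t[i]) = true := by
      simp only [beq_iff_eq]
      intro he
      exact hxt (he ▸ t.getElem_mem hi')
    simp only [List.eraseIdx_cons_succ, List.getElem_cons_succ]
    rw [List.erase_cons_tail hne, pv_eraseIdx_eq_erase t i hnt hi']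

theorem pv_eraseIdx_eq_filter (xs : List Int) (i : Nat) (hx : xs.Nodup) (hi : i < xs.length) :
    xs.eraseIdx i = xs.filter (fun e => decide (e ≠ xs[i])) := by
  rw [pv_eraseIdx_eq_erase xs i hx hi, hx.erase_eq_filter]
  refine List.filter_congr ?_
  intro e _
  by_cases h : e = xs[i] <;> simp [h]

theorem pv_eraseIdx_append : ∀ {α : Type} (xs : List α) (x : α), (xs ++ [x]).eraseIdx xs.length = xs
  | _, [], _ => rfl
  | _, y :: t, x => by
    simpa using pv_eraseIdx_append t x

theorem pv_pop_append {α : Type} (xs : List α) (x : α) : PySem.List.pop? (xs ++ [x]) = some (x, xs) := by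
  simp [PySem.List.pop?, PySem.List.pyIdx?, pv_eraseIdx_append]

theorem pv_slice_append {α : Type} (xs : List α) (x : α) :
    PySem.List.slice (xs ++ [x]) none (some (-1)) = xs := by
  simp [PySem.List.slice]

-- ---------- permutations ----------

theorem pv_mem_permutations : ∀ (r : Nat) (xs p : List Int), xs.Nodup →
    (p ∈ PySem.List.permutations xs r ↔ p.length = r ∧ p.Nodup ∧ p ⊆ xs)
  | 0, xs, p, hx => by
    rw [PySem.List.permutations_zero]
    constructor
    · intro hp
      have hp' : p = [] := by simpa using hp
      subst hp'
      exact ⟨rfl, List.nodup_nil, List.nil_subset _⟩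
    · rintro ⟨hl, -, -⟩
      have hp' : p = [] := List.length_eq_zero_iff.mp hl
      simp [hp']
  | r + 1, xs, p, hx => by
    rw [PySem.List.permutations_succ]
    simp only [List.mem_flatMap, List.mem_range]
    constructor
    · rintro ⟨i, hi, hpi⟩
      rw [List.getElem?_eq_getElem hi] at hpi
      simp only [List.mem_map] at hpi
      rcases hpi with ⟨q, hq, rfl⟩
      rcases (pv_mem_permutations r _ q (hx.eraseIdx i)).mp hq with ⟨hl, hn, hs⟩
      refine ⟨by simp [hl], ?_, ?_⟩
      · refine List.nodup_cons.mpr ⟨?_, hn⟩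
        intro hmem
        exact ((pv_mem_eraseIdx xs i hx hi _).mp (hs hmem)).2 rfl
      · intro a ha
        rcases List.mem_cons.mp ha with rfl | ha
        · exact xs.getElem_mem hi
        · exact ((pv_mem_eraseIdx xs i hx hi a).mp (hs ha)).1
    · rintro ⟨hl, hn, hs⟩
      cases p with
      | nil => simp at hl
      | cons a q =>
        obtain ⟨i, hi, ha⟩ := List.getElem_of_mem (hs List.mem_cons_self)
        subst ha
        refine ⟨i, hi, ?_⟩
        rw [List.getElem?_eq_getElem hi]
        simp only [List.mem_map]
        refine ⟨q, ?_, rfl⟩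
        rcases List.nodup_cons.mp hn with ⟨haq, hq⟩
        refine (pv_mem_permutations r _ q (hx.eraseIdx i)).mpr ⟨by simpa using hl, hq, ?_⟩
        intro b hb
        refine (pv_mem_eraseIdx xs i hx hi b).mpr ⟨hs (List.mem_cons_of_mem _ hb), ?_⟩
        rintro rfl
        exact haq hb

theorem pv_nodup_permutations : ∀ (r : Nat) (xs : List Int), xs.Nodup →
    (PySem.List.permutations xs r).Nodup
  | 0, xs, hx => by
    rw [PySem.List.permutations_zero]
    exact List.nodup_singleton _
  | r + 1, xs, hx => by
    rw [PySem.List.permutations_succ, List.nodup_flatMap]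
    constructor
    · intro i hi
      rw [List.mem_range] at hi
      rw [List.getElem?_eq_getElem hi]
      exact (pv_nodup_permutations r _ (hx.eraseIdx i)).map (fun q q' h => by
        simpa using h)
    · rw [List.pairwise_iff_getElem]
      intro i j hi hj hij
      simp only [List.length_range] at hi hj
      simp only [List.getElem_range]
      intro p hp1 hp2
      simp only [List.getElem?_eq_getElem hi, List.mem_map] at hp1
      simp only [List.getElem?_eq_getElem hj, List.mem_map] at hp2
      rcases hp1 with ⟨q1, _, hq1⟩
      rcases hp2 with ⟨q2, _, hq2⟩
      have : xs[i] = xs[j] := by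
        have := hq1.trans hq2.symm
        exact (List.cons.injEq _ _ _ _ ▸ this).1
      exact absurd ((List.Nodup.getElem_inj_iff hx).mp this) (Nat.ne_of_lt hij)

theorem pv_sublist_perm_eq : ∀ (xs s₁ s₂ : List Int), xs.Nodup →
    s₁.Sublist xs → s₂.Sublist xs → s₁.Perm s₂ → s₁ = s₂
  | [], s₁, s₂, _, h1, h2, _ => by
    rw [List.sublist_nil.mp h1, List.sublist_nil.mp h2]
  | x :: t, s₁, s₂, hx, h1, h2, hp => by
    rcases List.nodup_cons.mp hx with ⟨hxt, hnt⟩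
    cases h1 with
    | cons _ h1' =>
      cases h2 with
      | cons _ h2' => exact pv_sublist_perm_eq t s₁ s₂ hnt h1' h2' hp
      | cons₂ _ h2' =>
        exact absurd (h1'.subset (hp.mem_iff.mpr List.mem_cons_self)) hxt
    | cons₂ _ h1' =>
      cases h2 with
      | cons _ h2' =>
        exact absurd (h2'.subset (hp.mem_iff.mp List.mem_cons_self)) hxt
      | cons₂ _ h2' =>
        rw [pv_sublist_perm_eq t _ _ hnt h1' h2' hp.cons_inv]

theorem pv_digits_nodup : pvDigits.Nodup := by decide

theorem pv_nodup_combinations : ∀ (xs : List Int) (r : Nat), xs.Nodup →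
    (PySem.List.combinations xs r).Nodup
  | xs, 0, hx => by
    rw [PySem.List.combinations_zero]
    exact List.nodup_singleton _
  | [], r + 1, hx => by
    rw [PySem.List.combinations_nil_succ]
    exact List.nodup_nil
  | x :: xs, r + 1, hx => by
    rcases List.nodup_cons.mp hx with ⟨hxt, hnt⟩
    rw [PySem.List.combinations_cons_succ]
    refine List.Nodup.append
      ((pv_nodup_combinations xs r hnt).map (fun a b h => by simpa using h))
      (pv_nodup_combinations xs (r + 1) hnt) ?_
    rw [List.disjoint_left]
    intro c hc1 hc2
    simp only [List.mem_map] at hc1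
    rcases hc1 with ⟨c', _, rfl⟩
    have hsub := (PySem.List.mem_combinations_iff xs (r + 1) _).mp hc2
    exact hxt (hsub.1.subset List.mem_cons_self)

theorem pv_allA_perm (k : Nat) : (pvAllA k).Perm (PySem.List.permutations pvDigits k) := by
  have hd : pvDigits.Nodup := pv_digits_nodup
  have hnodA : (pvAllA k).Nodup := by
    unfold pvAllA
    rw [List.nodup_flatMap]
    constructor
    · intro X hX
      exact pv_nodup_permutations _ _
        (((PySem.List.mem_combinations_iff _ _ _).mp hX).1.nodup hd)
    · refine List.Pairwise.imp_of_mem ?_ (pv_nodup_combinations pvDigits k hd)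
      intro X1 X2 hX1 hX2 hne
      simp only [Function.onFun]
      rw [List.disjoint_left]
      intro p hp1 hp2
      rcases (PySem.List.mem_combinations_iff _ _ _).mp hX1 with ⟨hs1, hl1⟩
      rcases (PySem.List.mem_combinations_iff _ _ _).mp hX2 with ⟨hs2, hl2⟩
      rcases (pv_mem_permutations _ _ p (hs1.nodup hd)).mp hp1 with ⟨hpl1, hpn, hps1⟩
      rcases (pv_mem_permutations _ _ p (hs2.nodup hd)).mp hp2 with ⟨hpl2, _, hps2⟩
      have hperm1 : p.Perm X1 := (hpn.subperm hps1).perm_of_length_le (by omega)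
      have hperm2 : p.Perm X2 := (hpn.subperm hps2).perm_of_length_le (by omega)
      exact hne (pv_sublist_perm_eq pvDigits X1 X2 hd hs1 hs2 (hperm1.symm.trans hperm2))
  rw [List.perm_ext_iff_of_nodup hnodA (pv_nodup_permutations k pvDigits hd)]
  intro p
  rw [pv_mem_permutations k pvDigits p hd]
  unfold pvAllA
  simp only [List.mem_flatMap, PySem.List.mem_combinations_iff]
  constructor
  · rintro ⟨X, ⟨hXs, hXl⟩, hp⟩
    rcases (pv_mem_permutations X.length X p (hXs.nodup hd)).mp hp with ⟨hl, hn, hs⟩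
    exact ⟨hl.trans hXl, hn, hs.trans hXs.subset⟩
  · rintro ⟨hl, hn, hs⟩
    have hfn : (pvDigits.filter (fun e => decide (e ∈ p))).Nodup := hd.filter _
    have hperm : p.Perm (pvDigits.filter (fun e => decide (e ∈ p))) := by
      rw [List.perm_ext_iff_of_nodup hn hfn]
      intro a
      simp only [List.mem_filter, decide_eq_true_eq]
      constructor
      · intro ha
        exact ⟨hs ha, ha⟩
      · rintro ⟨-, ha⟩
        exact ha
    refine ⟨pvDigits.filter (fun e => decide (e ∈ p)), ⟨List.filter_sublist, ?_⟩, ?_⟩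
    · rw [← hperm.length_eq, hl]
    · exact (pv_mem_permutations _ _ p hfn).mpr ⟨hperm.length_eq, hn, hperm.subset⟩

-- ---------- the B-side count is a countP over all injective tuples ----------

theorem pv_rec_countP : ∀ (ps : List (Int × Bool)) (avail : List Int) (t : Int), avail.Nodup →
    pvRec ps avail t
      = (((PySem.List.permutations avail ps.length).countP (fun Y => pvEvalB ps Y t) : Nat) : Int)
  | [], avail, t, hav => by
    simp only [pvRec, List.length_nil, PySem.List.permutations_zero, List.countP_cons,
      List.countP_nil, pvEvalB]
    by_cases h : t = 0 <;> simp [h]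
  | (c, ld) :: rest, avail, t, hav => by
    show avail.foldl (fun cnt d =>
        if ld = true ∧ d = 0 then cnt
        else cnt + pvRec rest (avail.filter (fun e => e ≠ d)) (t + c * d)) 0 = _
    have hfun : (fun (cnt : Int) d =>
        if ld = true ∧ d = 0 then cnt
        else cnt + pvRec rest (avail.filter (fun e => e ≠ d)) (t + c * d))
        = (fun (cnt : Int) d => cnt + (((if ld = true ∧ d = 0 then (0 : Nat)
            else (PySem.List.permutations (avail.filter (fun e => decide (e ≠ d))) rest.length).countP
              (fun Y => pvEvalB rest Y (t + c * d))) : Nat) : Int)) := by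
      funext cnt d
      by_cases h : ld = true ∧ d = 0
      · simp [h]
      · rw [if_neg h, if_neg h, pv_rec_countP rest _ _ (hav.filter _)]
    rw [hfun, PySem.List.foldl_add, pv_cast_sum, zero_add]
    congr 1
    rw [List.length_cons, PySem.List.permutations_succ, List.countP_flatMap]
    refine Eq.symm (Eq.trans (congrArg List.sum
      (List.map_congr_left (l := List.range avail.length)
        (g := fun i => (fun d => if ld = true ∧ d = 0 then (0 : Nat)
          else (PySem.List.permutations (avail.filter (fun e => decide (e ≠ d))) rest.length).countP
            (fun Y => pvEvalB rest Y (t + c * d))) (avail.getD i 0)) ?_))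
      (congrArg List.sum (pv_map_range_getD Int Nat avail
        (fun d => if ld = true ∧ d = 0 then (0 : Nat)
          else (PySem.List.permutations (avail.filter (fun e => decide (e ≠ d))) rest.length).countP
            (fun Y => pvEvalB rest Y (t + c * d))) 0)))
    intro i hi
    rw [List.mem_range] at hi
    simp only [Function.comp]
    rw [List.getElem?_eq_getElem hi]
    show List.countP (fun Y => pvEvalB ((c, ld) :: rest) Y t)
        (List.map (fun p => avail[i] :: p) (PySem.List.permutations (avail.eraseIdx i) rest.length))
      = _
    rw [List.countP_map, List.getD_eq_getElem avail 0 hi,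
      ← pv_eraseIdx_eq_filter avail i hav hi]
    by_cases h : ld = true ∧ avail[i] = 0
    · rw [if_pos h]
      refine List.countP_eq_zero.mpr ?_
      intro Y _
      simp [pvEvalB, h]
    · rw [if_neg h]
      refine List.countP_congr ?_
      intro Y _
      simp only [Function.comp, pvEvalB, Bool.and_eq_true, decide_eq_true_eq]
      constructor
      · rintro ⟨-, hY⟩
        exact hY
      · intro hY
        exact ⟨h, hY⟩

theorem pv_evalB_iff : ∀ (ps : List (Int × Bool)) (Y : List Int) (t : Int), Y.length = ps.length →
    (pvEvalB ps Y t = true ↔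
      ((∀ x ∈ ps.zip Y, x.1.2 = true → x.2 ≠ 0)
        ∧ t + ((ps.zip Y).map (fun x => x.1.1 * x.2)).sum = 0))
  | [], [], t, _ => by simp [pvEvalB]
  | [], d :: Y, t, h => by simp at h
  | (c, ld) :: ps, [], t, h => by simp at h
  | (c, ld) :: ps, d :: Y, t, h => by
    have h' : Y.length = ps.length := by simpa using h
    simp only [pvEvalB, Bool.and_eq_true, decide_eq_true_eq, List.zip_cons_cons,
      List.mem_cons, List.map_cons, List.sum_cons]
    rw [pv_evalB_iff ps Y (t + c * d) h']
    constructor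
    · rintro ⟨hld, hall, hsum⟩
      refine ⟨?_, by linarith⟩
      rintro x (rfl | hx)
      · intro hl
        intro hd0
        exact hld ⟨hl, hd0⟩
      · exact hall x hx
    · rintro ⟨hall, hsum⟩
      refine ⟨?_, ?_, by linarith⟩
      · rintro ⟨hl, hd0⟩
        exact hall _ (Or.inl rfl) hl hd0
      · intro x hx
        exact hall x (Or.inr hx)

theorem pv_zip_zip_dot : ∀ (coeff : List Int) (lead : List Bool) (Y : List Int),
    lead.length = coeff.length →
    (((coeff.zip lead).zip Y).map (fun x => x.1.1 * x.2)).sum = pvDot coeff Y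
  | [], lead, Y, h => by simp [pvDot]
  | c :: cs, [], Y, h => by simp at h
  | c :: cs, l :: ls, [], h => by simp [pvDot]
  | c :: cs, l :: ls, y :: ys, h => by
    simp only [List.zip_cons_cons, List.map_cons, List.sum_cons, pvDot]
    have := pv_zip_zip_dot cs ls ys (by simpa using h)
    simp only [pvDot] at this
    rw [this]

theorem pv_zip_zip_lead (coeff : List Int) (lead : List Bool) (Y : List Int)
    (hc : coeff.length = Y.length) (h : lead.length = coeff.length) :
    ((∀ x ∈ (coeff.zip lead).zip Y, x.1.2 = true → x.2 ≠ 0) ↔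
      (∀ j, (hj : j < lead.length) → lead[j] = true → Y.getD j 0 ≠ 0)) := by
  have hlen : ((coeff.zip lead).zip Y).length = lead.length := by
    simp [List.length_zip, h, hc]
  constructor
  · intro hall j hj hl
    have hj1 : j < ((coeff.zip lead).zip Y).length := by omega
    have hx := hall _ (List.getElem_mem hj1)
    simp only [List.getElem_zip] at hx
    have hjY : j < Y.length := by omega
    rw [List.getD_eq_getElem Y 0 hjY]
    exact hx hl
  · intro hidx x hx
    rcases List.mem_iff_getElem.mp hx with ⟨j, hj, rfl⟩
    simp only [List.getElem_zip]
    intro hl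
    have hjY : j < Y.length := by
      simp only [List.length_zip] at hj
      omega
    have := hidx j (by omega) hl
    rw [List.getD_eq_getElem Y 0 hjY] at this
    exact this

-- ---------- coefficient algebra ----------

theorem pv_dot_set : ∀ (coeff Y : List Int) (j : Nat) (v : Int),
    j < coeff.length → coeff.length ≤ Y.length →
    pvDot (coeff.set j (coeff.getD j 0 + v)) Y = pvDot coeff Y + v * Y.getD j 0
  | [], Y, j, v, hj, hy => by simp at hj
  | c :: cs, [], j, v, hj, hy => by simp at hy
  | c :: cs, y :: ys, 0, v, hj, hy => by
    simp only [List.set_cons_zero, List.getD_cons_zero, pvDot, List.zip_cons_cons,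
      List.map_cons, List.sum_cons]
    ring
  | c :: cs, y :: ys, j + 1, v, hj, hy => by
    simp only [List.set_cons_succ, List.getD_cons_succ, pvDot, List.zip_cons_cons,
      List.map_cons, List.sum_cons]
    have := pv_dot_set cs ys j v (by simpa using hj) (by simpa using hy)
    simp only [pvDot] at this
    rw [this]
    ring

theorem pv_foldl_set_len (letters : List Char) (s : Int) : ∀ (r : List Char) (coeff : List Int) (p : Int),
    ((r.foldl (fun (cp : List Int × Int) ch =>
      (cp.1.set ((PySem.List.index? letters ch).getD 0)
        (cp.1.getD ((PySem.List.index? letters ch).getD 0) 0 + s * cp.2), cp.2 * 10)) (coeff, p)).1).length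
      = coeff.length
  | [], coeff, p => rfl
  | ch :: r, coeff, p => by
    rw [List.foldl_cons, pv_foldl_set_len letters s r _ _]
    exact List.length_set

theorem pv_addw_len (letters : List Char) (s : Int) (coeff : List Int) (w : List Char) :
    (pvAddw letters s coeff w).length = coeff.length :=
  pv_foldl_set_len letters s w.reverse coeff 1

theorem pv_rval_append (Y : List Int) : ∀ (r : List Nat) (c : Nat),
    pvRVal Y (r ++ [c]) = pvRVal Y r + 10 ^ r.length * Y.getD c 0
  | [], c => by simp [pvRVal]
  | b :: r, c => by
    simp only [List.cons_append, pvRVal, pv_rval_append Y r c, List.length_cons]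
    ring

theorem pv_horner_aux (Y : List Int) : ∀ (w : List Nat) (a : Int),
    w.foldl (fun s c => 10 * s + Y.getD c 0) a = a * 10 ^ w.length + pvRVal Y w.reverse
  | [], a => by simp [pvRVal]
  | c :: w, a => by
    rw [List.foldl_cons, pv_horner_aux Y w (10 * a + Y.getD c 0)]
    rw [List.reverse_cons, pv_rval_append]
    simp only [List.length_reverse, List.length_cons]
    ring

theorem pv_horner_rval (Y : List Int) (w : List Nat) : pvHorner Y w = pvRVal Y w.reverse := by
  unfold pvHorner
  rw [pv_horner_aux Y w 0]
  ring

theorem pv_foldl_set_dot (letters : List Char) (s : Int) (Y : List Int) :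
    ∀ (r : List Char) (coeff : List Int) (p : Int),
    (∀ ch ∈ r, pvIdx letters ch < coeff.length) → coeff.length ≤ Y.length →
    pvDot ((r.foldl (fun (cp : List Int × Int) ch =>
      (cp.1.set ((PySem.List.index? letters ch).getD 0)
        (cp.1.getD ((PySem.List.index? letters ch).getD 0) 0 + s * cp.2), cp.2 * 10)) (coeff, p)).1) Y
      = pvDot coeff Y + s * p * pvRVal Y (r.map (pvIdx letters))
  | [], coeff, p, _, _ => by simp [pvRVal]
  | ch :: r, coeff, p, hr, hy => by
    rw [List.foldl_cons]
    have hidx : pvIdx letters ch < coeff.length := hr ch List.mem_cons_self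
    have hlen : (coeff.set ((PySem.List.index? letters ch).getD 0)
        (coeff.getD ((PySem.List.index? letters ch).getD 0) 0 + s * p)).length = coeff.length :=
      List.length_set
    rw [pv_foldl_set_dot letters s Y r _ _
      (fun c hc => by rw [hlen]; exact hr c (List.mem_cons_of_mem _ hc)) (by rw [hlen]; exact hy)]
    have hset := pv_dot_set coeff Y (pvIdx letters ch) (s * p) hidx hy
    simp only [pvIdx] at hset
    rw [hset]
    simp only [List.map_cons, pvRVal, pvIdx]
    ring

theorem pv_addw_dot (letters : List Char) (s : Int) (coeff : List Int) (w : List Char) (Y : List Int)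
    (hw : ∀ ch ∈ w, pvIdx letters ch < coeff.length) (hy : coeff.length ≤ Y.length) :
    pvDot (pvAddw letters s coeff w) Y
      = pvDot coeff Y + s * pvHorner Y (w.map (pvIdx letters)) := by
  unfold pvAddw
  rw [pv_foldl_set_dot letters s Y w.reverse coeff 1
    (fun ch hc => hw ch (List.mem_reverse.mp hc)) hy]
  rw [pv_horner_rval, ← List.map_reverse]
  ring

theorem pv_dot_zero : ∀ (k : Nat) (Y : List Int), pvDot (List.replicate k 0) Y = 0
  | 0, Y => by simp [pvDot]
  | k + 1, [] => by simp [pvDot]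
  | k + 1, y :: ys => by
    simp only [List.replicate_succ, pvDot, List.zip_cons_cons, List.map_cons, List.sum_cons]
    have := pv_dot_zero k ys
    simp only [pvDot] at this
    rw [this]
    ring

-- ---------- lead characterization ----------

theorem pv_lead_aux_len (letters : List Char) : ∀ (W : List String) (init : List Bool),
    (W.foldl (fun ld w =>
      match w.toList with
      | [] => ld
      | c :: _ => ld.set ((PySem.List.index? letters c).getD 0) true) init).length
      = init.length
  | [], init => rfl
  | w :: W, init => by
    rw [List.foldl_cons, pv_lead_aux_len letters W _]
    cases w.toList with
    | nil => rfl
    | cons c r => exact List.length_set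
  termination_by W => W.length

theorem pv_lead_len (letters : List Char) (W : List String) :
    (pvLead letters W).length = letters.length := by
  unfold pvLead
  rw [pv_lead_aux_len]
  exact List.length_replicate

theorem pv_getD_set_bool (init : List Bool) (i j : Nat) (hj : j < init.length) :
    (init.set i true).getD j false = (if i = j then true else init.getD j false) := by
  rw [List.getD_eq_getElem _ false (by simpa using hj), List.getElem_set]
  by_cases h : i = j
  · rw [if_pos h, if_pos h]
  · rw [if_neg h, if_neg h, List.getD_eq_getElem init false hj]

theorem pv_lead_aux_getD (letters : List Char) : ∀ (W : List String) (init : List Bool) (j : Nat),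
    j < init.length →
    ((W.foldl (fun ld w =>
        match w.toList with
        | [] => ld
        | c :: _ => ld.set ((PySem.List.index? letters c).getD 0) true) init).getD j false = true
      ↔ init.getD j false = true
        ∨ ∃ w ∈ W, ∃ c r, w.toList = c :: r ∧ pvIdx letters c = j)
  | [], init, j, hj => by simp
  | w :: W, init, j, hj => by
    rw [List.foldl_cons]
    cases hw : w.toList with
    | nil =>
      rw [pv_lead_aux_getD letters W init j hj]
      constructor
      · rintro (hi | ⟨w', hw', hrest⟩)
        · exact Or.inl hi
        · exact Or.inr ⟨w', List.mem_cons_of_mem _ hw', hrest⟩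
      · rintro (hi | ⟨w', hw', c, r, hw'', he⟩)
        · exact Or.inl hi
        · rcases List.mem_cons.mp hw' with rfl | hmem
          · rw [hw] at hw''
            exact absurd hw'' (List.cons_ne_nil c r).symm
          · exact Or.inr ⟨w', hmem, c, r, hw'', he⟩
    | cons c0 r0 =>
      rw [pv_lead_aux_getD letters W _ j (by rw [List.length_set]; exact hj),
        pv_getD_set_bool init _ j hj]
      by_cases h : pvIdx letters c0 = j
      · have h' : (PySem.List.index? letters c0).getD 0 = j := h
        rw [if_pos h']
        constructor
        · intro _
          exact Or.inr ⟨w, List.mem_cons_self, c0, r0, hw, h⟩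
        · intro _
          simp
      · have h' : ¬ (PySem.List.index? letters c0).getD 0 = j := h
        rw [if_neg h']
        constructor
        · rintro (hi | ⟨w', hw', hrest⟩)
          · exact Or.inl hi
          · exact Or.inr ⟨w', List.mem_cons_of_mem _ hw', hrest⟩
        · rintro (hi | ⟨w', hw', c, r, hw'', he⟩)
          · exact Or.inl hi
          · rcases List.mem_cons.mp hw' with rfl | hmem
            · rw [hw] at hw''
              rcases List.cons.injEq c0 r0 c r ▸ hw'' with ⟨rfl, -⟩
              exact absurd he h
            · exact Or.inr ⟨w', hmem, c, r, hw'', he⟩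
  termination_by W => W.length

theorem pv_lead_getD (letters : List Char) (W : List String) (j : Nat) (hj : j < letters.length) :
    ((pvLead letters W).getD j false = true
      ↔ ∃ w ∈ W, ∃ c r, w.toList = c :: r ∧ pvIdx letters c = j) := by
  unfold pvLead
  rw [pv_lead_aux_getD letters W _ j (by rw [List.length_replicate]; exact hj)]
  simp

-- ---------- letters ----------

theorem pv_set_update_ofList (s : PySem.Set Char) (cs : List Char) :
    PySem.Set.update s (PySem.Set.ofList cs) = PySem.Set.update s cs := by
  rw [PySem.Set.update_eq_append_filter, PySem.Set.update_eq_append_filter, PySem.Set.ofList_ofList]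

theorem pv_letters_eq (W : List String) : pvLettersA W = pvLettersB W := by
  unfold pvLettersA pvLettersB
  refine PySem.List.foldl_congr_mem _ _ _ _ ?_
  intro acc w _
  show PySem.Set.union acc (PySem.Set.ofList w.toList) = w.toList.foldl PySem.Set.add acc
  have h1 : PySem.Set.union acc (PySem.Set.ofList w.toList)
      = PySem.Set.update acc (PySem.Set.ofList w.toList) := rfl
  have h2 : PySem.Set.update acc w.toList = w.toList.foldl PySem.Set.add acc := rfl
  rw [h1, pv_set_update_ofList, h2]

theorem pv_mem_lettersB_aux (x : Char) : ∀ (W : List String) (s : PySem.Set Char),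
    (x ∈ W.foldl (fun ls w => w.toList.foldl PySem.Set.add ls) s ↔ x ∈ s ∨ ∃ w ∈ W, x ∈ w.toList)
  | [], s => by simp
  | w :: W, s => by
    rw [List.foldl_cons, pv_mem_lettersB_aux x W _]
    have : w.toList.foldl PySem.Set.add s = PySem.Set.update s w.toList := rfl
    rw [this]
    rw [PySem.Set.mem_update]
    constructor
    · rintro ((hs | hw) | ⟨w', hw', hx⟩)
      · exact Or.inl hs
      · exact Or.inr ⟨w, List.mem_cons_self, hw⟩
      · exact Or.inr ⟨w', List.mem_cons_of_mem _ hw', hx⟩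
    · rintro (hs | ⟨w', hw', hx⟩)
      · exact Or.inl (Or.inl hs)
      · rcases List.mem_cons.mp hw' with rfl | hw''
        · exact Or.inl (Or.inr hx)
        · exact Or.inr ⟨w', hw'', hx⟩

theorem pv_mem_lettersB (W : List String) (c : Char) :
    c ∈ pvLettersB W ↔ ∃ w ∈ W, c ∈ w.toList := by
  unfold pvLettersB
  rw [pv_mem_lettersB_aux c W PySem.Set.empty]
  simp [PySem.Set.empty]

theorem pv_idx_lt (L : List Char) (c : Char) (h : c ∈ L) : pvIdx L c < L.length := by
  unfold pvIdx
  rcases Option.isSome_iff_exists.mp ((PySem.List.index?_isSome_iff L c).mpr h) with ⟨k, hk⟩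
  rcases (PySem.List.index?_eq_some_iff L c k).mp hk with ⟨pre, suf, hL, hlen, -⟩
  rw [hk]
  simp only [Option.getD_some]
  rw [hL, ← hlen]
  simp [List.length_append]

-- ---------- A as a countP ----------

theorem pv_A_countP (W : List String) (T : List Nat) (Ws : List (List Nat))
    (hpop : PySem.List.pop? (W.map (fun w => w.toList.map
        (fun c => (PySem.List.index? (pvLettersA W) c).getD 0)))
      = some (T, Ws)) :
    solve_count W = (((pvAllA (pvLettersA W).length).countP (pvPredA T Ws) : Nat) : Int) := by
  simp only [solve_count]
  rw [hpop]
  have hin : ∀ (X : List Int) (cnt : Int), ∀ (Y : List Int),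
      (if Y.getD (T.getD 0 0) 0 ≠ 0 then
        if Ws.foldl (fun S w => S + pvHorner Y w) 0 = pvHorner Y T
            ∧ Ws.all (fun w => decide (Y.getD (w.getD 0 0) 0 ≠ 0)) then cnt + 1
        else cnt
      else cnt) = (if pvPredA T Ws Y then cnt + 1 else cnt) := by
    intro X cnt Y
    by_cases h1 : Y.getD (T.getD 0 0) 0 ≠ 0
    · by_cases h2 : Ws.foldl (fun S w => S + pvHorner Y w) 0 = pvHorner Y T
          ∧ Ws.all (fun w => decide (Y.getD (w.getD 0 0) 0 ≠ 0))
      · rw [if_pos h1, if_pos h2,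
          if_pos (show pvPredA T Ws Y = true by
            simp only [pvPredA, decide_eq_true_eq]
            exact ⟨h1, h2⟩)]
      · rw [if_pos h1, if_neg h2,
          if_neg (show ¬ pvPredA T Ws Y = true by
            simp only [pvPredA, decide_eq_true_eq]
            rintro ⟨-, hh⟩
            exact h2 hh)]
    · rw [if_neg h1,
        if_neg (show ¬ pvPredA T Ws Y = true by
          simp only [pvPredA, decide_eq_true_eq]
          rintro ⟨hh, -⟩
          exact h1 hh)]
  show (PySem.List.combinations pvDigits (pvLettersA W).length).foldl _ 0 = _
  have hfun1 : (fun (cnt : Int) Y =>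
      if Y.getD (T.getD 0 0) 0 ≠ 0 then
        if Ws.foldl (fun S w => S + pvHorner Y w) 0 = pvHorner Y T
            ∧ Ws.all (fun w => decide (Y.getD (w.getD 0 0) 0 ≠ 0)) then cnt + 1
        else cnt
      else cnt) = (fun (cnt : Int) Y => if pvPredA T Ws Y then cnt + 1 else cnt) := by
    funext cnt Y
    exact hin [] cnt Y
  rw [hfun1]
  simp only [PySem.List.foldl_if_add_one]
  rw [PySem.List.foldl_add, pv_cast_sum, zero_add]
  congr 1
  unfold pvAllA
  rw [List.countP_flatMap]
  rfl

-- ---------- MAIN ----------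

theorem pv_fold_addw_len (L : List Char) : ∀ (B : List String) (c0 : List Int),
    (B.foldl (fun c w => pvAddw L 1 c w.toList) c0).length = c0.length
  | [], c0 => rfl
  | w :: B, c0 => by
    rw [List.foldl_cons, pv_fold_addw_len L B _, pv_addw_len]

theorem pv_fold_addw_dot (L : List Char) (Y : List Int) : ∀ (B : List String) (c0 : List Int),
    (∀ w ∈ B, ∀ ch ∈ w.toList, pvIdx L ch < c0.length) → c0.length ≤ Y.length →
    pvDot (B.foldl (fun c w => pvAddw L 1 c w.toList) c0) Y
      = pvDot c0 Y + (B.map (fun w => pvHorner Y (w.toList.map (pvIdx L)))).sum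
  | [], c0, _, _ => by simp
  | w :: B, c0, hB, hy => by
    rw [List.foldl_cons]
    rw [pv_fold_addw_dot L Y B _
      (fun w' hw' ch hch => by
        rw [pv_addw_len]
        exact hB w' (List.mem_cons_of_mem _ hw') ch hch)
      (by rw [pv_addw_len]; exact hy)]
    rw [pv_addw_dot L 1 c0 w.toList Y (fun ch hch => hB w List.mem_cons_self ch hch) hy]
    simp only [List.map_cons, List.sum_cons]
    ring

theorem pv_main (W : List String) (h1 : W ≠ []) (h2 : ∀ w ∈ W, w.toList ≠ []) :
    solve_count W = solve_count_alt W := by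
  obtain ⟨B0, t0, rfl⟩ : ∃ B0 t0, W = B0 ++ [t0] :=
    ⟨W.dropLast, W.getLast h1, (List.dropLast_append_getLast h1).symm⟩
  have hLA := pv_letters_eq (B0 ++ [t0])
  set L : List Char := pvLettersB (B0 ++ [t0]) with hLdef
  have hmemL : ∀ w ∈ B0 ++ [t0], ∀ ch ∈ w.toList, ch ∈ L := by
    intro w hw ch hch
    rw [hLdef]
    exact (pv_mem_lettersB _ ch).mpr ⟨w, hw, hch⟩
  have hidxlt : ∀ w ∈ B0 ++ [t0], ∀ ch ∈ w.toList, pvIdx L ch < L.length := by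
    intro w hw ch hch
    exact pv_idx_lt L ch (hmemL w hw ch hch)
  have ht0mem : t0 ∈ B0 ++ [t0] := by simp
  -- A side
  have hpop : PySem.List.pop? ((B0 ++ [t0]).map (fun w => w.toList.map
      (fun c => (PySem.List.index? (pvLettersA (B0 ++ [t0])) c).getD 0)))
      = some (t0.toList.map (pvIdx L), B0.map (fun w => w.toList.map (pvIdx L))) := by
    rw [hLA, List.map_append, List.map_singleton]
    exact pv_pop_append _ _
  rw [pv_A_countP _ _ _ hpop, hLA]
  -- B side
  have hBalt : solve_count_alt (B0 ++ [t0])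
      = pvRec ((pvAddw L (-1) (B0.foldl (fun c w => pvAddw L 1 c w.toList)
          (List.replicate L.length 0)) t0.toList).zip (pvLead L (B0 ++ [t0]))) pvDigits 0 := by
    simp only [solve_count_alt, ← hLdef, PySem.List.pyGet?_neg_one_append_singleton,
      pv_slice_append]
    rfl
  rw [hBalt]
  set C : List Int := pvAddw L (-1) (B0.foldl (fun c w => pvAddw L 1 c w.toList)
      (List.replicate L.length 0)) t0.toList with hCdef
  set lead : List Bool := pvLead L (B0 ++ [t0]) with hleaddef
  have hClen : C.length = L.length := by
    rw [hCdef, pv_addw_len, pv_fold_addw_len, List.length_replicate]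
  have hleadlen : lead.length = L.length := by
    rw [hleaddef, pv_lead_len]
  have hitems : (C.zip lead).length = L.length := by
    rw [List.length_zip, hClen, hleadlen, Nat.min_self]
  rw [pv_rec_countP (C.zip lead) pvDigits 0 pv_digits_nodup, hitems,
    ← (pv_allA_perm L.length).countP_eq]
  congr 1
  refine List.countP_congr ?_
  intro Y hY
  have hYlen : Y.length = L.length :=
    ((pv_mem_permutations L.length pvDigits Y pv_digits_nodup).mp
      (((pv_allA_perm L.length).mem_iff).mp hY)).1
  have hYlen' : L.length ≤ Y.length := by rw [hYlen]
  have hYC : Y.length = (C.zip lead).length := by rw [hitems, hYlen]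
  rw [pv_evalB_iff (C.zip lead) Y 0 hYC,
    pv_zip_zip_dot C lead Y (by rw [hleadlen, hClen]),
    pv_zip_zip_lead C lead Y (by rw [hClen, hYlen]) (by rw [hleadlen, hClen])]
  have hdot : pvDot C Y
      = (B0.map (fun w => pvHorner Y (w.toList.map (pvIdx L)))).sum
        - pvHorner Y (t0.toList.map (pvIdx L)) := by
    rw [hCdef]
    rw [pv_addw_dot L (-1) _ t0.toList Y
      (fun ch hch => by
        rw [pv_fold_addw_len, List.length_replicate]
        exact hidxlt t0 ht0mem ch hch)
      (by rw [pv_fold_addw_len, List.length_replicate]; exact hYlen')]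
    rw [pv_fold_addw_dot L Y B0 _
      (fun w hw ch hch => by
        rw [List.length_replicate]
        exact hidxlt w (List.mem_append_left _ hw) ch hch)
      (by rw [List.length_replicate]; exact hYlen')]
    rw [pv_dot_zero]
    ring
  rw [hdot]
  have hlead_iff : (∀ j, (hj : j < lead.length) → lead[j] = true → Y.getD j 0 ≠ 0)
      ↔ ∀ w ∈ B0 ++ [t0], Y.getD ((w.toList.map (pvIdx L)).getD 0 0) 0 ≠ 0 := by
    constructor
    · intro hj w hw
      obtain ⟨c, r, hw'⟩ : ∃ c r, w.toList = c :: r := by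
        cases hcase : w.toList with
        | nil => exact absurd hcase (h2 w hw)
        | cons c r => exact ⟨c, r, rfl⟩
      rw [hw']
      simp only [List.map_cons, List.getD_cons_zero]
      have hlt : pvIdx L c < L.length := pv_idx_lt L c (hmemL w hw c (by rw [hw']; simp))
      have hlt' : pvIdx L c < lead.length := by
        rw [hleadlen]
        exact hlt
      refine hj _ hlt' ?_
      have hgd := (pv_lead_getD L (B0 ++ [t0]) _ hlt).mpr ⟨w, hw, c, r, hw', rfl⟩
      rw [← hleaddef, List.getD_eq_getElem _ false hlt'] at hgd
      exact hgd
    · intro hw j hj hl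
      have hjL : j < L.length := by
        rw [← hleadlen]
        exact hj
      have hgd : (pvLead L (B0 ++ [t0])).getD j false = true := by
        rw [← hleaddef, List.getD_eq_getElem _ false hj]
        exact hl
      rcases (pv_lead_getD L (B0 ++ [t0]) j hjL).mp hgd with ⟨w, hwmem, c, r, hw', he⟩
      have hv := hw w hwmem
      rw [hw'] at hv
      simp only [List.map_cons, List.getD_cons_zero] at hv
      rw [← he]
      exact hv
  rw [hlead_iff]
  have hS : (B0.map (fun w => w.toList.map (pvIdx L))).foldl (fun S w => S + pvHorner Y w) 0
      = (B0.map (fun w => pvHorner Y (w.toList.map (pvIdx L)))).sum := by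
    rw [PySem.List.foldl_add, zero_add, List.map_map]
    rfl
  simp only [pvPredA, decide_eq_true_eq, List.all_eq_true, List.mem_map, hS]
  constructor
  · rintro ⟨hT, hsum, hall⟩
    refine ⟨?_, by linarith⟩
    intro w hw
    rcases List.mem_append.mp hw with hw' | hw'
    · exact hall _ ⟨w, hw', rfl⟩
    · rw [List.mem_singleton.mp hw']
      exact hT
  · rintro ⟨hall, hsum⟩
    refine ⟨hall t0 ht0mem, by linarith, ?_⟩
    rintro x ⟨w, hw', rfl⟩
    exact hall w (List.mem_append_left _ hw')

-- ---------- the length-gap branch: both sides count 0 ----------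

theorem pv_digits_bounds : ∀ y ∈ pvDigits, 0 ≤ y ∧ y ≤ 9 := by decide

theorem pv_getD_bounds (Y : List Int) (hY : ∀ y ∈ Y, 0 ≤ y ∧ y ≤ 9) (c : Nat) :
    0 ≤ Y.getD c 0 ∧ Y.getD c 0 ≤ 9 := by
  by_cases h : c < Y.length
  · rw [List.getD_eq_getElem Y 0 h]
    exact hY _ (List.getElem_mem h)
  · rw [List.getD_eq_default Y 0 (by omega)]
    omega

theorem pv_rval_bounds (Y : List Int) (hY : ∀ y ∈ Y, 0 ≤ y ∧ y ≤ 9) :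
    ∀ w : List Nat, 0 ≤ pvRVal Y w ∧ pvRVal Y w ≤ 10 ^ w.length - 1
  | [] => by simp [pvRVal]
  | c :: r => by
    have hc := pv_getD_bounds Y hY c
    have ih := pv_rval_bounds Y hY r
    simp only [pvRVal, List.length_cons]
    have hp : (10 : Int) ^ (r.length + 1) = 10 * 10 ^ r.length := by ring
    constructor
    · linarith [ih.1, hc.1]
    · rw [hp]
      linarith [ih.2, hc.2]

theorem pv_horner_bounds (Y : List Int) (hY : ∀ y ∈ Y, 0 ≤ y ∧ y ≤ 9) (w : List Nat) :
    0 ≤ pvHorner Y w ∧ pvHorner Y w ≤ 10 ^ w.length - 1 := by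
  rw [pv_horner_rval]
  have h := pv_rval_bounds Y hY w.reverse
  rwa [List.length_reverse] at h

theorem pv_horner_lower (Y : List Int) (hY : ∀ y ∈ Y, 0 ≤ y ∧ y ≤ 9) (c : Nat) (r : List Nat) :
    10 ^ r.length * Y.getD c 0 ≤ pvHorner Y (c :: r) := by
  rw [pv_horner_rval, List.reverse_cons, pv_rval_append, List.length_reverse]
  linarith [(pv_rval_bounds Y hY r.reverse).1]

theorem pv_one_le_pow (n : Nat) : (1 : Int) ≤ 10 ^ n :=
  one_le_pow₀ (by norm_num)

theorem pv_sum_bound (Y : List Int) (hY : ∀ y ∈ Y, 0 ≤ y ∧ y ≤ 9) (L : List Char) :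
    ∀ B0 : List String,
      0 ≤ (B0.map (fun w => pvHorner Y (w.toList.map (pvIdx L)))).sum
      ∧ (B0.map (fun w => pvHorner Y (w.toList.map (pvIdx L)))).sum
          ≤ 10 ^ ((B0.map (fun w => w.toList.length)).sum) - 1
  | [] => by simp
  | w :: B0 => by
    have ih := pv_sum_bound Y hY L B0
    have hw := pv_horner_bounds Y hY (w.toList.map (pvIdx L))
    rw [List.length_map] at hw
    simp only [List.map_cons, List.sum_cons]
    have hpow : (10 : Int) ^ (w.toList.length + (B0.map (fun w => w.toList.length)).sum)
        = 10 ^ w.toList.length * 10 ^ ((B0.map (fun w => w.toList.length)).sum) := pow_add 10 _ _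
    have h1 := pv_one_le_pow w.toList.length
    have h2 := pv_one_le_pow ((B0.map (fun w => w.toList.length)).sum)
    constructor
    · linarith [hw.1, ih.1]
    · rw [hpow]
      nlinarith [hw.2, ih.2, h1, h2]

theorem pv_unsat (L : List Char) (Y : List Int) (B0 : List String) (c : Char) (r : List Char)
    (hY : ∀ y ∈ Y, 0 ≤ y ∧ y ≤ 9)
    (hlen : (B0.map (fun w => w.toList.length)).sum + 1 ≤ (c :: r).length)
    (hT0 : Y.getD (pvIdx L c) 0 ≠ 0) :
    (B0.map (fun w => pvHorner Y (w.toList.map (pvIdx L)))).sum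
      ≠ pvHorner Y ((c :: r).map (pvIdx L)) := by
  intro he
  have hS := pv_sum_bound Y hY L B0
  have hlow := pv_horner_lower Y hY (pvIdx L c) (r.map (pvIdx L))
  rw [List.length_map] at hlow
  have hT0' : 1 ≤ Y.getD (pvIdx L c) 0 := by
    have hbb := pv_getD_bounds Y hY (pvIdx L c)
    omega
  have hge : (10 : Int) ^ r.length ≤ pvHorner Y (pvIdx L c :: r.map (pvIdx L)) := by
    nlinarith [hlow, pv_one_le_pow r.length]
  have hmono : (10 : Int) ^ ((B0.map (fun w => w.toList.length)).sum) ≤ 10 ^ r.length := by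
    refine pow_le_pow_right₀ (by norm_num) ?_
    simp only [List.length_cons] at hlen
    omega
  simp only [List.map_cons] at he
  linarith [hS.2, hge, hmono]

theorem pv_main2 (W : List String) (h1 : W ≠ [])
    (hb : (W.getLastD "").toList ≠ [] ∧
      (W.dropLast.map (fun w => w.toList.length)).sum + 1 ≤ (W.getLastD "").toList.length) :
    solve_count W = solve_count_alt W := by
  obtain ⟨B0, t0, rfl⟩ : ∃ B0 t0, W = B0 ++ [t0] :=
    ⟨W.dropLast, W.getLast h1, (List.dropLast_append_getLast h1).symm⟩
  rw [List.getLastD_concat, List.dropLast_concat] at hb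
  obtain ⟨c0, r0, ht0⟩ : ∃ c r, t0.toList = c :: r := by
    cases hcase : t0.toList with
    | nil => exact absurd hcase hb.1
    | cons c r => exact ⟨c, r, rfl⟩
  have hLA := pv_letters_eq (B0 ++ [t0])
  set L : List Char := pvLettersB (B0 ++ [t0]) with hLdef
  have hmemL : ∀ w ∈ B0 ++ [t0], ∀ ch ∈ w.toList, ch ∈ L := by
    intro w hw ch hch
    rw [hLdef]
    exact (pv_mem_lettersB _ ch).mpr ⟨w, hw, hch⟩
  have hidxlt : ∀ w ∈ B0 ++ [t0], ∀ ch ∈ w.toList, pvIdx L ch < L.length := by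
    intro w hw ch hch
    exact pv_idx_lt L ch (hmemL w hw ch hch)
  have ht0mem : t0 ∈ B0 ++ [t0] := by simp
  have hpop : PySem.List.pop? ((B0 ++ [t0]).map (fun w => w.toList.map
      (fun c => (PySem.List.index? (pvLettersA (B0 ++ [t0])) c).getD 0)))
      = some (t0.toList.map (pvIdx L), B0.map (fun w => w.toList.map (pvIdx L))) := by
    rw [hLA, List.map_append, List.map_singleton]
    exact pv_pop_append _ _
  rw [pv_A_countP _ _ _ hpop, hLA]
  have hBalt : solve_count_alt (B0 ++ [t0])
      = pvRec ((pvAddw L (-1) (B0.foldl (fun c w => pvAddw L 1 c w.toList)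
          (List.replicate L.length 0)) t0.toList).zip (pvLead L (B0 ++ [t0]))) pvDigits 0 := by
    simp only [solve_count_alt, ← hLdef, PySem.List.pyGet?_neg_one_append_singleton,
      pv_slice_append]
    rfl
  rw [hBalt]
  set C : List Int := pvAddw L (-1) (B0.foldl (fun c w => pvAddw L 1 c w.toList)
      (List.replicate L.length 0)) t0.toList with hCdef
  set lead : List Bool := pvLead L (B0 ++ [t0]) with hleaddef
  have hClen : C.length = L.length := by
    rw [hCdef, pv_addw_len, pv_fold_addw_len, List.length_replicate]
  have hleadlen : lead.length = L.length := by
    rw [hleaddef, pv_lead_len]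
  have hitems : (C.zip lead).length = L.length := by
    rw [List.length_zip, hClen, hleadlen, Nat.min_self]
  rw [pv_rec_countP (C.zip lead) pvDigits 0 pv_digits_nodup, hitems,
    ← (pv_allA_perm L.length).countP_eq]
  congr 1
  refine Eq.trans (List.countP_eq_zero.mpr ?_) (Eq.symm (List.countP_eq_zero.mpr ?_))
  all_goals intro Y hY
  case _ =>
    have hmem := (pv_mem_permutations L.length pvDigits Y pv_digits_nodup).mp
      (((pv_allA_perm L.length).mem_iff).mp hY)
    have hY9 : ∀ y ∈ Y, 0 ≤ y ∧ y ≤ 9 := fun y hy => pv_digits_bounds y (hmem.2.2 hy)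
    simp only [pvPredA, decide_eq_true_eq, not_and]
    intro hT hrest
    have hS : (B0.map (fun w => w.toList.map (pvIdx L))).foldl (fun S w => S + pvHorner Y w) 0
        = (B0.map (fun w => pvHorner Y (w.toList.map (pvIdx L)))).sum := by
      rw [PySem.List.foldl_add, zero_add, List.map_map]
      rfl
    rw [hS] at hrest
    rw [ht0] at hT
    simp only [List.map_cons, List.getD_cons_zero] at hT
    rw [ht0] at hrest
    exact absurd hrest (pv_unsat L Y B0 c0 r0 hY9 (by rw [← ht0]; simpa using hb.2) hT)
  case _ =>
    have hmem := (pv_mem_permutations L.length pvDigits Y pv_digits_nodup).mp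
      (((pv_allA_perm L.length).mem_iff).mp hY)
    have hY9 : ∀ y ∈ Y, 0 ≤ y ∧ y ≤ 9 := fun y hy => pv_digits_bounds y (hmem.2.2 hy)
    have hYC : Y.length = (C.zip lead).length := by
      rw [hitems, hmem.1]
    intro heval
    rw [pv_evalB_iff (C.zip lead) Y 0 hYC] at heval
    rw [pv_zip_zip_dot C lead Y (by rw [hleadlen, hClen])] at heval
    have hdot : pvDot C Y
        = (B0.map (fun w => pvHorner Y (w.toList.map (pvIdx L)))).sum
          - pvHorner Y (t0.toList.map (pvIdx L)) := by
      rw [hCdef]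
      rw [pv_addw_dot L (-1) _ t0.toList Y
        (fun ch hch => by
          rw [pv_fold_addw_len, List.length_replicate]
          exact hidxlt t0 ht0mem ch hch)
        (by rw [pv_fold_addw_len, List.length_replicate, hmem.1])]
      rw [pv_fold_addw_dot L Y B0 _
        (fun w hw ch hch => by
          rw [List.length_replicate]
          exact hidxlt w (List.mem_append_left _ hw) ch hch)
        (by rw [List.length_replicate, hmem.1])]
      rw [pv_dot_zero]
      ring
    rw [hdot] at heval
    have hall := (pv_zip_zip_lead C lead Y (by rw [hClen, hmem.1]) (by
      rw [hleadlen, hClen])).mp heval.1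
    have hlt : pvIdx L c0 < L.length :=
      pv_idx_lt L c0 (hmemL t0 ht0mem c0 (by rw [ht0]; simp))
    have hlt' : pvIdx L c0 < lead.length := by
      rw [hleadlen]
      exact hlt
    have hgd := (pv_lead_getD L (B0 ++ [t0]) _ hlt).mpr ⟨t0, ht0mem, c0, r0, ht0, rfl⟩
    rw [← hleaddef, List.getD_eq_getElem _ false hlt'] at hgd
    have hT0 : Y.getD (pvIdx L c0) 0 ≠ 0 := hall _ hlt' hgd
    have hcontra := pv_unsat L Y B0 c0 r0 hY9 (by rw [← ht0]; simpa using hb.2) hT0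
    rw [ht0] at heval
    exact hcontra (by linarith [heval.2])

-- ===== VERDICT (by name: the statement is the Claim_ definition above) =====
theorem solve_count_spec : Claim_equal_solve_count := by
  intro W _ hpre
  unfold Spec_solve_count
  rcases hpre.2 with hall | hlen
  · exact pv_main W hpre.1 hall
  · exact pv_main2 W hpre.1 hlen
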